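-- pv_equiv track=rewrite | github.com/leonOKS23/mind2web-live-seeact-v | transfer_obs/convert_traj.py | parse_action_str
-- ===== SOURCE A (Python) =====
-- def parse_action_str(action_str):
--     # parse action string into action name and infos
--     # info might contains
--     action_name=action_str.split(' ')[0]
--     action_infos=action_str[len(action_name)+1:]
--     infos=[]
--     l=len(action_infos)
--     i=0
--     while i<l:
--         if action_infos[i]=='[':
--             j=i+1
--             content=''
--             still_open=1
--             while still_open>0:
--                 if action_infos[j]=='[':
--                     still_open+=1
--                 elif action_infos[j]==']':
--                     still_open-=1
--                     if still_open==0: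
--                         break
--                 content+=action_infos[j]
--                 j+=1
--             i=j+1
--             infos.append(content)
--         elif action_infos[i]==' ':
--             pass
--         else:
--             raise ValueError('The action string is invalid')
--         i+=1
--     return action_name,infos
-- ===== SOURCE B (Python) =====
-- def parse_action_str(action_str):
--     # single flat pass with an explicit bracket-depth counter instead of nested while loops
--     action_name = action_str.split(' ')[0]
--     action_infos = action_str[len(action_name)+1:]
--     infos = []
--     depth = 0
--     buf = []
--     for ch in action_infos:
--         if ch == '[':
--             if depth > 0:
--                 buf.append(ch)
--             depth += 1
--         elif ch == ']' and depth > 0: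
--             depth -= 1
--             if depth == 0:
--                 infos.append(''.join(buf))
--                 buf = []
--             else:
--                 buf.append(ch)
--         elif depth > 0:
--             buf.append(ch)
--         elif ch != ' ':
--             raise ValueError('The action string is invalid')
--     if depth > 0:
--         raise ValueError('The action string is invalid')
--     return action_name, infos
-- ===== Notes on version B (the rewrite author's own statement) =====
-- stated objective: simpler
-- what changed: A's nested while loops with manual index arithmetic (an inner scan re-entered for every bracket group) are replaced by one flat for-loop over the characters that maintains a single bracket-depth counter and a current-group buffer. Pre_ excludes inputs on which A raises (unbalanced brackets, a stray character at bracket depth 0) and also inputs such as "click [a]x[b]" where A's outer loop accidentally skips the one character after each closing bracket and still returns a value, while B naturally raises ValueError there.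
-- outside the precondition, e.g. on parse_action_str('click [a]x[b]'): A returns ('click', ['a', 'b']), B raises ValueError; on parse_action_str('click [a]]'): A returns ('click', ['a']), B raises ValueError
import Mathlib
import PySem

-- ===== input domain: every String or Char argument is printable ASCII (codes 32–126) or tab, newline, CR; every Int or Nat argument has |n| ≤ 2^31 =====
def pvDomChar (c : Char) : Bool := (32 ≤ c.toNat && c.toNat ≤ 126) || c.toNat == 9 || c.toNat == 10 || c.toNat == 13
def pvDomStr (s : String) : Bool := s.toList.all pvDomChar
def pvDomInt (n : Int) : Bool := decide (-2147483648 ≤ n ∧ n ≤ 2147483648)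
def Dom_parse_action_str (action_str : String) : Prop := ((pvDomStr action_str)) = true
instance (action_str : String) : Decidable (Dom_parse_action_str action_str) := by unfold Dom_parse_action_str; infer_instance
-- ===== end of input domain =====

-- B re-implements the nested-while bracket scan of A as ONE flat pass with an explicit
-- depth counter (objective: simpler); equivalence is proved on Pre_-valid action strings.

-- shared prelude of BOTH Pythons (their first two lines are identical):
-- action_name = action_str.split(' ')[0]
def pvName (action_str : String) : String :=
  ((PySem.Str.split? action_str " ").getD []).headD ""
-- action_infos = action_str[len(action_name)+1:]  (as a list of characters)
def pvRest (action_str : String) : List Char :=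
  (PySem.Str.slice action_str (some (PySem.Str.len (pvName action_str) + 1)) none).toList

-- ===== PORT A =====
-- inner while loop of A: scan from position j (here: the remaining characters) at
-- nesting 'so', accumulating 'content'; none = IndexError (unterminated bracket);
-- on break returns (content, characters after the closing ']').
def pvInnerA : List Char → Int → List Char → Option (List Char × List Char)
  | [], _, _ => none
  | c :: rest, so, content =>
    let so' := if c = '[' then so + 1 else if c = ']' then so - 1 else so
    if c = ']' ∧ so' = 0 then some (content, rest)
    else pvInnerA rest so' (content ++ [c])

-- needed by pvOuterA's termination proof
theorem pvInnerA_length (cs : List Char) (so : Int) (content p : List Char)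
    (rest : List Char) (h : pvInnerA cs so content = some (p, rest)) :
    rest.length < cs.length := by
  induction cs generalizing so content with
  | nil => simp [pvInnerA] at h
  | cons c cs ih =>
    simp only [pvInnerA] at h
    by_cases hb : c = ']' ∧ (if c = '[' then so + 1 else if c = ']' then so - 1 else so) = 0
    · rw [if_pos hb] at h
      injection h with h'
      injection h' with h1 h2
      simp [← h2]
    · rw [if_neg hb] at h
      have := ih _ _ h
      simp
      omega

-- outer while loop of A: none = ValueError/IndexError; after a group A sets
-- i = j + 1 and then i += 1, i.e. it also skips the character after the ']'.
def pvOuterA : List Char → List String → Option (List String)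
  | [], infos => some infos
  | c :: rest, infos =>
    if c = '[' then
      match h : pvInnerA rest 1 [] with
      | none => none
      | some (content, rest') => pvOuterA (rest'.drop 1) (infos ++ [String.ofList content])
    else if c = ' ' then pvOuterA rest infos
    else none
termination_by cs => cs.length
decreasing_by
  · have h1 := pvInnerA_length _ _ _ _ _ h
    have h2 : (rest'.drop 1).length ≤ rest'.length := by simp
    simp
    omega
  · simp

def parse_action_str (action_str : String) : String × List String :=
  (pvName action_str, (pvOuterA (pvRest action_str) []).getD [])

-- ===== PORT B =====
-- B's flat for-loop over the characters: state = (depth, buf, infos); none = ValueError.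
def pvLoopB : List Char → Int → List Char → List String → Option (List String)
  | [], d, _, infos => if 0 < d then none else some infos
  | c :: cs, d, buf, infos =>
    if c = '[' then pvLoopB cs (d + 1) (if 0 < d then buf ++ [c] else buf) infos
    else if c = ']' ∧ 0 < d then
      (if d - 1 = 0 then pvLoopB cs (d - 1) [] (infos ++ [String.ofList buf])
       else pvLoopB cs (d - 1) (buf ++ [c]) infos)
    else if 0 < d then pvLoopB cs d (buf ++ [c]) infos
    else if c ≠ ' ' then none
    else pvLoopB cs d buf infos

def parse_action_str_alt (action_str : String) : String × List String :=
  (pvName action_str, (pvLoopB (pvRest action_str) 0 [] []).getD [])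

-- ===== PRECONDITION & SPEC =====
def pvDep (l : List Char) : Int := (l.count '[' : Int) - (l.count ']' : Int)

-- Pre_ = the inputs on which BOTH Pythons return normally: in the text after the first
-- word, bracket depth never goes negative and ends at zero (otherwise A raises
-- ValueError / IndexError), every depth-0 character is a space or an opening bracket
-- (else ValueError), and each top-level closing bracket is followed by a space or the
-- end.  The last clause also excludes inputs such as "click [a]x[b]", where A RETURNS
-- ('click', ['a', 'b']) — A's outer loop accidentally skips one character after every
-- closing bracket — while B naturally raises ValueError on the stray letter x.
def Pre_parse_action_str (action_str : String) : Prop :=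
  pvDep (pvRest action_str) = 0 ∧
  (∀ k, k ≤ (pvRest action_str).length → 0 ≤ pvDep ((pvRest action_str).take k)) ∧
  (∀ k, k < (pvRest action_str).length → pvDep ((pvRest action_str).take k) = 0 →
    (pvRest action_str)[k]? = some ' ' ∨ (pvRest action_str)[k]? = some '[') ∧
  (∀ k, k < (pvRest action_str).length → pvDep ((pvRest action_str).take k) = 1 →
    (pvRest action_str)[k]? = some ']' →
    (k + 1 = (pvRest action_str).length ∨ (pvRest action_str)[k + 1]? = some ' '))
instance (action_str : String) : Decidable (Pre_parse_action_str action_str) := by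
  unfold Pre_parse_action_str; infer_instance

def pvWitness_parse_action_str : String := "click [a[b]c] [idx 7]"

def Spec_parse_action_str (action_str : String) (out : String × List String) : Prop :=
  out = parse_action_str_alt action_str
instance (action_str : String) (out : String × List String) :
    Decidable (Spec_parse_action_str action_str out) := by
  unfold Spec_parse_action_str; infer_instance

-- ===== CLAIM (what is proved, stated in full; the proofs are below) =====
def Claim_equal_parse_action_str : Prop :=
  ∀ (action_str : String), Dom_parse_action_str action_str →
    Pre_parse_action_str action_str →
    Spec_parse_action_str action_str (parse_action_str action_str)

-- ===== LEMMAS AND PROOFS =====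

-- grammar of Pre_-valid tails: pvIn d cs rest = 'cs continues a group currently at
-- depth d; the matching close leaves exactly rest'; pvTp cs = valid top-level tail.
inductive pvIn : Nat → List Char → List Char → Prop where
  | closeT (rest) : pvIn 1 (']' :: rest) rest
  | closeI (d cs rest) : pvIn (d + 1) cs rest → pvIn (d + 2) (']' :: cs) rest
  | open_ (d cs rest) : pvIn (d + 2) cs rest → pvIn (d + 1) ('[' :: cs) rest
  | other (d c cs rest) : c ≠ '[' → c ≠ ']' → pvIn (d + 1) cs rest → pvIn (d + 1) (c :: cs) rest

inductive pvTp : List Char → Prop where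
  | nil : pvTp []
  | sp (cs) : pvTp cs → pvTp (' ' :: cs)
  | grNil (cs) : pvIn 1 cs [] → pvTp ('[' :: cs)
  | grSp (cs r) : pvIn 1 cs (' ' :: r) → pvTp r → pvTp ('[' :: cs)

-- the proof-side copy of Pre_'s conditions, on a raw character list
def pvPre (cs : List Char) : Prop :=
  pvDep cs = 0 ∧
  (∀ k, k ≤ cs.length → 0 ≤ pvDep (cs.take k)) ∧
  (∀ k, k < cs.length → pvDep (cs.take k) = 0 → cs[k]? = some ' ' ∨ cs[k]? = some '[') ∧
  (∀ k, k < cs.length → pvDep (cs.take k) = 1 → cs[k]? = some ']' →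
    (k + 1 = cs.length ∨ cs[k + 1]? = some ' '))

theorem pre_iff (s : String) : Pre_parse_action_str s ↔ pvPre (pvRest s) := Iff.rfl

theorem pvDep_append (a b : List Char) : pvDep (a ++ b) = pvDep a + pvDep b := by
  simp [pvDep, List.count_append]; ring

theorem pvDep_cons (c : Char) (l : List Char) :
    pvDep (c :: l) = (if c = '[' then 1 else if c = ']' then -1 else 0) + pvDep l := by
  simp [pvDep, List.count_cons]
  split_ifs <;> simp_all <;> ring

-- the inner loop of A and the deep (depth > 0) phase of B agree on any valid group
theorem pvEinner (D : Nat) (cs rest : List Char) (h : pvIn D cs rest) :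
    ∀ content infos, ∃ mid, cs = mid ++ ']' :: rest ∧
      pvInnerA cs (D : Int) content = some (content ++ mid, rest) ∧
      pvLoopB cs (D : Int) content infos
        = pvLoopB rest 0 [] (infos ++ [String.ofList (content ++ mid)]) := by
  induction h with
  | closeT rest =>
    intro content infos
    exact ⟨[], by simp, by simp [pvInnerA], by simp [pvLoopB]⟩
  | closeI d cs rest h ih =>
    intro content infos
    obtain ⟨mid, hcs, hA, hB⟩ := ih (content ++ [']']) infos
    refine ⟨']' :: mid, by simp [hcs], ?_, ?_⟩
    · simp only [pvInnerA, show ((']' : Char) = '[') = False from by simp,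
        show ((']' : Char) = ']') = True from by simp, if_true, if_false, true_and]
      rw [if_neg (show ¬(((d + 2 : Nat) : Int) - 1 = 0) from by push_cast; omega),
        show ((d + 2 : Nat) : Int) - 1 = ((d + 1 : Nat) : Int) from by push_cast; ring, hA]
      simp
    · simp only [pvLoopB, show ((']' : Char) = '[') = False from by simp,
        show ((']' : Char) = ']') = True from by simp, if_true, if_false, true_and]
      rw [if_pos (show (0 : Int) < ((d + 2 : Nat) : Int) from by push_cast; omega),
        if_neg (show ¬(((d + 2 : Nat) : Int) - 1 = 0) from by push_cast; omega),
        show ((d + 2 : Nat) : Int) - 1 = ((d + 1 : Nat) : Int) from by push_cast; ring, hB]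
      simp
  | open_ d cs rest h ih =>
    intro content infos
    obtain ⟨mid, hcs, hA, hB⟩ := ih (content ++ ['[']) infos
    refine ⟨'[' :: mid, by simp [hcs], ?_, ?_⟩
    · simp only [pvInnerA, show (('[' : Char) = '[') = True from by simp,
        show (('[' : Char) = ']') = False from by simp, if_true, if_false, false_and]
      rw [show ((d + 1 : Nat) : Int) + 1 = ((d + 2 : Nat) : Int) from by push_cast; ring, hA]
      simp
    · simp only [pvLoopB, if_true]
      rw [if_pos (show (0 : Int) < ((d + 1 : Nat) : Int) from by push_cast; omega),
        show ((d + 1 : Nat) : Int) + 1 = ((d + 2 : Nat) : Int) from by push_cast; ring, hB]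
      simp
  | other d c cs rest hc1 hc2 h ih =>
    intro content infos
    obtain ⟨mid, hcs, hA, hB⟩ := ih (content ++ [c]) infos
    refine ⟨c :: mid, by simp [hcs], ?_, ?_⟩
    · simp only [pvInnerA, show (c = '[') = False from by simp [hc1],
        show (c = ']') = False from by simp [hc2], if_false, false_and]
      rw [hA]
      simp
    · simp only [pvLoopB, show (c = '[') = False from by simp [hc1],
        show (c = ']') = False from by simp [hc2], if_false, false_and]
      rw [if_pos (show (0 : Int) < ((d + 1 : Nat) : Int) from by push_cast; omega), hB]
      simp

-- main loop equivalence on valid top-level tails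
theorem pvOuterA_bracket (cs : List Char) (infos : List String)
    (content rest' : List Char) (hA : pvInnerA cs 1 [] = some (content, rest')) :
    pvOuterA ('[' :: cs) infos = pvOuterA (rest'.drop 1) (infos ++ [String.ofList content]) := by
  simp only [pvOuterA, show (('[' : Char) = '[') = True from by simp, if_true]
  split
  · next heq => rw [hA] at heq; cases heq
  · next heq => rw [hA] at heq; cases heq; rfl

theorem pvEmain (cs : List Char) (h : pvTp cs) :
    ∀ infos, pvOuterA cs infos = pvLoopB cs 0 [] infos := by
  induction h with
  | nil => intro infos; simp [pvOuterA, pvLoopB]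
  | sp cs h ih =>
    intro infos
    rw [show pvOuterA (' ' :: cs) infos = pvOuterA cs infos from by
      simp [pvOuterA]]
    rw [show pvLoopB (' ' :: cs) 0 [] infos = pvLoopB cs 0 [] infos from by
      simp [pvLoopB]]
    exact ih infos
  | grNil cs h =>
    intro infos
    obtain ⟨mid, hcs, hA, hB⟩ := pvEinner 1 cs [] h [] infos
    rw [show ((1 : Nat) : Int) = (1 : Int) from rfl] at hA hB
    rw [pvOuterA_bracket cs infos _ _ hA]
    rw [show pvLoopB ('[' :: cs) 0 [] infos = pvLoopB cs 1 [] infos from by simp [pvLoopB]]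
    rw [hB]
    simp [pvOuterA, pvLoopB]
  | grSp cs r h htp ih =>
    intro infos
    obtain ⟨mid, hcs, hA, hB⟩ := pvEinner 1 cs (' ' :: r) h [] infos
    rw [show ((1 : Nat) : Int) = (1 : Int) from rfl] at hA hB
    rw [pvOuterA_bracket cs infos _ _ hA]
    rw [show pvLoopB ('[' :: cs) 0 [] infos = pvLoopB cs 1 [] infos from by simp [pvLoopB]]
    rw [hB]
    rw [show pvLoopB (' ' :: r) 0 [] (infos ++ [String.ofList ([] ++ mid)])
        = pvLoopB r 0 [] (infos ++ [String.ofList ([] ++ mid)]) from by simp [pvLoopB]]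
    simp only [List.drop_succ_cons, List.drop_zero, List.nil_append]
    exact ih (infos ++ [String.ofList mid])

-- counts-to-grammar, inner part
theorem pvBuildIn (mid : List Char) : ∀ (d : Nat) (rest : List Char),
    (∀ k, k ≤ mid.length → 1 ≤ (d : Int) + 1 + pvDep (mid.take k)) →
    ((d : Int) + 1 + pvDep mid = 1) →
    pvIn (d + 1) (mid ++ ']' :: rest) rest := by
  induction mid with
  | nil =>
    intro d rest _ hfin
    have hd : d = 0 := by
      simp [pvDep] at hfin
      omega
    subst hd
    exact pvIn.closeT rest
  | cons c mid ih =>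
    intro d rest hge hfin
    rw [pvDep_cons] at hfin
    have h1 := hge 1 (by simp)
    simp only [List.take_succ_cons, List.take_zero, pvDep_cons] at h1
    have hgen : ∀ k, k ≤ mid.length →
        1 ≤ (d : Int) + 1 + ((if c = '[' then 1 else if c = ']' then -1 else 0)
          + pvDep (mid.take k)) := by
      intro k hk
      have := hge (k + 1) (by simp; omega)
      simpa [pvDep_cons] using this
    by_cases hc1 : c = '['
    · subst hc1
      simp only [show (('[' : Char) = '[') = True from by simp, if_true] at hfin hgen
      have : pvIn (d + 2) (mid ++ ']' :: rest) rest := by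
        apply ih (d + 1)
        · intro k hk
          have := hgen k hk
          push_cast
          omega
        · push_cast
          omega
      exact pvIn.open_ d _ rest this
    · by_cases hc2 : c = ']'
      · subst hc2
        simp only [show ((']' : Char) = '[') = False from by simp,
          show ((']' : Char) = ']') = True from by simp, if_true, if_false] at hfin hgen h1
        simp [pvDep] at h1
        have hd : 1 ≤ d := by omega
        obtain ⟨d', rfl⟩ : ∃ d', d = d' + 1 := ⟨d - 1, by omega⟩
        have : pvIn (d' + 1) (mid ++ ']' :: rest) rest := by
          apply ih d'
          · intro k hk
            have := hgen k hk
            push_cast at this ⊢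
            omega
          · push_cast at hfin ⊢
            omega
        exact pvIn.closeI d' _ rest this
      · simp only [show (c = '[') = False from by simp [hc1],
          show (c = ']') = False from by simp [hc2], if_false] at hfin hgen
        have : pvIn (d + 1) (mid ++ ']' :: rest) rest := by
          apply ih d
          · intro k hk
            have := hgen k hk
            omega
          · omega
        exact pvIn.other d c _ rest hc1 hc2 this

theorem pvDep_nil : pvDep [] = 0 := by simp [pvDep]

theorem pvDep_cons_open (l : List Char) : pvDep ('[' :: l) = 1 + pvDep l := by
  rw [pvDep_cons]; simp

theorem pvDep_cons_close (l : List Char) : pvDep (']' :: l) = -1 + pvDep l := by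
  rw [pvDep_cons]; simp

theorem pvDep_cons_other (c : Char) (l : List Char) (h1 : c ≠ '[') (h2 : c ≠ ']') :
    pvDep (c :: l) = pvDep l := by
  rw [pvDep_cons]; simp [h1, h2]

theorem pvPre_drop (cs : List Char) (n : Nat) (hn : n ≤ cs.length)
    (h : pvPre cs) (h0 : pvDep (cs.take n) = 0) : pvPre (cs.drop n) := by
  obtain ⟨hh0, hh1, hh2, hh3⟩ := h
  have key : ∀ k, pvDep ((cs.drop n).take k) = pvDep (cs.take (n + k)) := by
    intro k
    rw [List.take_add, pvDep_append, h0, zero_add]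
  refine ⟨?_, ?_, ?_, ?_⟩
  · have hsplit := pvDep_append (cs.take n) (cs.drop n)
    rw [List.take_append_drop] at hsplit
    omega
  · intro k hk
    rw [key]
    exact hh1 (n + k) (by simp at hk ⊢; omega)
  · intro k hk hz
    rw [key] at hz
    have := hh2 (n + k) (by simp at hk ⊢; omega) hz
    rwa [List.getElem?_drop]
  · intro k hk hz hchar
    rw [key] at hz
    rw [List.getElem?_drop] at hchar
    have := hh3 (n + k) (by simp at hk ⊢; omega) hz hchar
    rcases this with hend | hsp
    · left; simp at hk ⊢; omega
    · right
      rw [List.getElem?_drop, show n + (k + 1) = n + k + 1 from by omega]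
      exact hsp

-- counts-to-grammar, top level
theorem pvPreToTp (n : Nat) : ∀ cs : List Char, cs.length ≤ n → pvPre cs → pvTp cs := by
  induction n with
  | zero =>
    intro cs hl _
    have : cs = [] := List.eq_nil_of_length_eq_zero (by omega)
    subst this
    exact pvTp.nil
  | succ n ih =>
    intro cs hl hp
    cases cs with
    | nil => exact pvTp.nil
    | cons c cs' =>
      have h0 := hp.1
      have h1 := hp.2.1
      have h2 := hp.2.2.1
      have h3 := hp.2.2.2
      have hhead : c = ' ' ∨ c = '[' := by
        have := h2 0 (by simp) (by simp [pvDep_nil])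
        simpa using this
      rcases hhead with hc | hc
      · -- leading space
        subst hc
        apply pvTp.sp
        apply ih cs' (by simp at hl; omega)
        have := pvPre_drop (' ' :: cs') 1 (by simp) hp
          (by simp [pvDep_cons_other, pvDep_nil])
        simpa using this
      · -- a bracket group starts
        subst hc
        have h0' : 1 + pvDep cs' = 0 := by
          rw [pvDep_cons_open] at h0
          exact h0
        have hex : ∃ k, k ≤ cs'.length ∧ 1 + pvDep (cs'.take k) = 0 :=
          ⟨cs'.length, le_rfl, by rw [List.take_length]; exact h0'⟩
        obtain ⟨m, hmeq⟩ : ∃ m, Nat.find hex = m := ⟨_, rfl⟩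
        have hm := Nat.find_spec hex
        rw [hmeq] at hm
        have hm1 : 1 ≤ m := by
          rcases Nat.eq_zero_or_pos m with hz | hpos
          · exfalso
            have := hm.2
            rw [hz] at this
            simp [pvDep_nil] at this
          · exact hpos
        have hstay : ∀ k, k < m → 0 ≤ pvDep (cs'.take k) ∧ pvDep (cs'.take k) ≠ -1 := by
          intro k hk
          have hnk := Nat.find_min hex (hmeq ▸ hk)
          push_neg at hnk
          have hkle : k ≤ cs'.length := le_trans (le_of_lt hk) hm.1
          have hge0 : 0 ≤ pvDep (('[' :: cs').take (k + 1)) :=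
            h1 (k + 1) (by simp; omega)
          rw [List.take_succ_cons, pvDep_cons_open] at hge0
          have hne := hnk hkle
          constructor
          · omega
          · omega
        have hMm : pvDep (cs'.take m) = -1 := by have := hm.2; omega
        have hm'lt : m - 1 < cs'.length := by omega
        have htk : cs'.take m = cs'.take (m - 1) ++ [cs'[m - 1]] := by
          conv_lhs => rw [show m = (m - 1) + 1 from by omega]
          rw [List.take_add_one, List.getElem?_eq_getElem hm'lt]
          simp
        have hprev := hstay (m - 1) (by omega)
        have hsing : pvDep (cs'.take m) = pvDep (cs'.take (m - 1)) + pvDep [cs'[m - 1]] := by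
          rw [htk, pvDep_append]
        have hcm : cs'[m - 1] = ']' ∧ pvDep (cs'.take (m - 1)) = 0 := by
          by_cases b1 : cs'[m - 1] = '['
          · rw [b1, pvDep_cons_open, pvDep_nil] at hsing; omega
          · by_cases b2 : cs'[m - 1] = ']'
            · rw [b2, pvDep_cons_close, pvDep_nil] at hsing
              exact ⟨b2, by omega⟩
            · rw [pvDep_cons_other _ _ b1 b2, pvDep_nil] at hsing; omega
        have hdecomp : cs' = cs'.take (m - 1) ++ ']' :: cs'.drop m := by
          conv_lhs => rw [← List.take_append_drop (m - 1) cs']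
          congr 1
          rw [List.drop_eq_getElem_cons hm'lt, hcm.1,
            show m - 1 + 1 = m from by omega]
        have hin : pvIn 1 (cs'.take (m - 1) ++ ']' :: cs'.drop m) (cs'.drop m) := by
          apply pvBuildIn (cs'.take (m - 1)) 0 (cs'.drop m)
          · intro k hk
            have hlen : (cs'.take (m - 1)).length = m - 1 := by simp; omega
            rw [hlen] at hk
            rw [List.take_take, min_eq_left hk]
            have := hstay k (by omega)
            push_cast
            omega
          · push_cast
            omega
        have hchar : ('[' :: cs')[m]? = some ']' := by
          conv_lhs => rw [show m = (m - 1) + 1 from by omega]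
          rw [List.getElem?_cons_succ, List.getElem?_eq_getElem hm'lt, hcm.1]
        have hdep1 : pvDep (('[' :: cs').take m) = 1 := by
          conv_lhs => rw [show m = (m - 1) + 1 from by omega]
          rw [List.take_succ_cons, pvDep_cons_open, hcm.2]
          norm_num
        have h3' := h3 m (by simp; omega) hdep1 hchar
        rcases h3' with hend | hsp
        · have hml : m = cs'.length := by simp at hend; omega
          have hdrop : cs'.drop m = [] := by rw [hml, List.drop_length]
          rw [hdrop] at hin
          refine pvTp.grNil cs' ?_
          nth_rewrite 1 [hdecomp]
          rw [hdrop]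
          exact hin
        · have hsp' : cs'[m]? = some ' ' := by rwa [List.getElem?_cons_succ] at hsp
          have hmlt : m < cs'.length := by
            by_contra hge
            rw [List.getElem?_eq_none (by omega)] at hsp'
            simp at hsp'
          have hgm : cs'[m] = ' ' := by
            rw [List.getElem?_eq_getElem hmlt] at hsp'
            exact Option.some.inj hsp'
          have hdropm : cs'.drop m = ' ' :: cs'.drop (m + 1) := by
            rw [List.drop_eq_getElem_cons hmlt, hgm]
          rw [hdropm] at hin
          refine pvTp.grSp cs' (cs'.drop (m + 1)) ?_ ?_
          · nth_rewrite 1 [hdecomp]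
            rw [hdropm]
            exact hin
          · apply ih
            · simp at hl ⊢
              omega
            · have hdep0 : pvDep (('[' :: cs').take (m + 2)) = 0 := by
                rw [show m + 2 = (m + 1) + 1 from rfl, List.take_succ_cons, pvDep_cons_open]
                have htk1 : cs'.take (m + 1) = cs'.take m ++ [cs'[m]] := by
                  rw [List.take_add_one, List.getElem?_eq_getElem hmlt]
                  simp
                rw [htk1, pvDep_append, hgm,
                  pvDep_cons_other ' ' [] (by decide) (by decide), pvDep_nil]
                omega
              have hdd := pvPre_drop ('[' :: cs') (m + 2) (by simp; omega) hp hdep0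
              rw [show m + 2 = (m + 1) + 1 from rfl, List.drop_succ_cons] at hdd
              exact hdd

-- ===== VERDICT (by name: the statement is the Claim_ definition above) =====
theorem parse_action_str_spec : Claim_equal_parse_action_str := by
  intro s _ hpre
  unfold Spec_parse_action_str parse_action_str parse_action_str_alt
  have htp : pvTp (pvRest s) :=
    pvPreToTp (pvRest s).length (pvRest s) le_rfl ((pre_iff s).mp hpre)
  rw [pvEmain (pvRest s) htp []]
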